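-- pv_equiv track=rewrite | github.com/ReaperSoftOFFC/godlieings | godly.py | format_menu
-- ===== SOURCE A (Python) =====
-- def format_menu(options):
--     max_len = max(len(option) for option in options)
--     formatted_menu = []
--     for i in range(0, len(options), 2):
--         left = options[i].ljust(max_len + 2)
--         if i + 1 < len(options):
--             right = options[i + 1].ljust(max_len + 2)
--         else:
--             right = ""
--         formatted_menu.append(left + right)
--     return "\n".join(formatted_menu)
-- ===== SOURCE B (Python) =====
-- def format_menu(options):
--     width = max(len(option) for option in options) + 2
--     return "".join(
--         ("\n" if i > 0 and i % 2 == 0 else "") + option.ljust(width)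
--         for i, option in enumerate(options)
--     )
-- ===== Notes on version B (the rewrite author's own statement) =====
-- stated objective: alternative
-- what changed: A builds a list of two-item rows (step-2 index loop, per-row right-cell branch) and joins them with newlines; B builds no rows at all: a single pass over enumerate(options) emits each padded option prefixed by a newline exactly when its index is positive and even, joined with the empty string.
import Mathlib
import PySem

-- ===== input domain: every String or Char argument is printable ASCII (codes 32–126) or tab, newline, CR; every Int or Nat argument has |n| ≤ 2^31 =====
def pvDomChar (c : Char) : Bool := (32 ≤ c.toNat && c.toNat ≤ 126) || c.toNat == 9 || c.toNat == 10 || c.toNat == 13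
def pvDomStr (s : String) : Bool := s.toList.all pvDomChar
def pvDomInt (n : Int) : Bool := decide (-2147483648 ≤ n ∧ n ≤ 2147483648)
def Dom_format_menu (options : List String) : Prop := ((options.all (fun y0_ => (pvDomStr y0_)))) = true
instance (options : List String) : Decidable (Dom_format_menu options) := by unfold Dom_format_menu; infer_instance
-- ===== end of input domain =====

-- B drops A's row list entirely: one pass over enumerate(options) emits each padded option with a newline prefix at positive even indices; objective: alternative decomposition.

-- s.ljust(w): exact port of Python str.ljust on List Char (pad on the right with spaces up to width w)
def pyLjust (cs : List Char) (w : Int) : List Char := cs ++ List.replicate (w - cs.length).toNat ' '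

-- ===== PORT A =====
def format_menu (options : List String) : String :=
  let maxLen : Int := (PySem.List.max? (options.map PySem.Str.len) (fun x => x)).getD 0
  let rows := (PySem.List.pyRange 0 (options.length : Int) 2).foldl
    (fun acc i =>
      let left := pyLjust (PySem.List.pyGetD options i "").toList (maxLen + 2)
      let right := if i + 1 < (options.length : Int) then
          pyLjust (PySem.List.pyGetD options (i + 1) "").toList (maxLen + 2)
        else []
      acc ++ [left ++ right]) []
  String.ofList (PySem.Chars.join ['\n'] rows)

-- ===== PORT B =====
def format_menu_alt (options : List String) : String :=
  let w : Int := (PySem.List.max? (options.map PySem.Str.len) (fun x => x)).getD 0 + 2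
  String.ofList (PySem.Chars.join []
    ((PySem.List.enumerate options 0).map (fun p =>
      (if 0 < p.1 ∧ PySem.Int.mod p.1 2 = 0 then ['\n'] else []) ++ pyLjust p.2.toList w)))

-- ===== PRECONDITION & SPEC =====
-- Pre_ excludes only the empty list, on which A (and B) raise ValueError from max() of an empty sequence.
def Pre_format_menu (options : List String) : Prop := options ≠ []
instance (options : List String) : Decidable (Pre_format_menu options) := by unfold Pre_format_menu; infer_instance
def pvWitness_format_menu : List String := (["play", "quit", "help"])
def Spec_format_menu (options : List String) (out : String) : Prop := out = format_menu_alt options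
instance (options : List String) (out : String) : Decidable (Spec_format_menu options out) := by unfold Spec_format_menu; infer_instance

-- ===== CLAIM (what is proved, stated in full; the proofs are below) =====
def Claim_equal_format_menu : Prop := ∀ (options : List String), Dom_format_menu options → Pre_format_menu options → Spec_format_menu options (format_menu options)

-- ===== LEMMAS AND PROOFS =====

-- proof-side row view of the menu (used by both directions of the proof)
def altRows (w : Int) : List String → List (List Char)
  | [] => []
  | [x] => [pyLjust x.toList w]
  | x :: y :: rest => (pyLjust x.toList w ++ pyLjust y.toList w) :: altRows w rest

lemma pyRange02 (n : Nat) :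
    PySem.List.pyRange 0 (n : Int) 2 = (List.range ((n + 1) / 2)).map (fun k : Nat => 2 * (k : Int)) := by
  rcases Nat.eq_zero_or_pos n with h | h
  · subst h; simp [PySem.List.pyRange_of_pos]
  · rw [PySem.List.pyRange_of_pos 0 (n : Int) (by norm_num)]
    have hlt : (0 : Int) < (n : Int) := by exact_mod_cast h
    rw [if_pos hlt]
    have : (((n : Int) - 0 + 2 - 1) / 2).toNat = (n + 1) / 2 := by omega
    rw [this]
    simp only [zero_add]

lemma pyGetD_shift2 {α : Type} (a b : α) (l : List α) (j : Nat) (d : α) :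
    PySem.List.pyGetD (a :: b :: l) ((j : Int) + 2) d = PySem.List.pyGetD l (j : Int) d := by
  rw [show ((j : Int) + 2) = ((j + 2 : Nat) : Int) by push_cast; ring,
      PySem.List.pyGetD_natCast, PySem.List.pyGetD_natCast,
      show j + 2 = j + 1 + 1 from rfl]
  simp [List.getD]

lemma loop_eq (w : Int) :
    ∀ (xs : List String) (acc : List (List Char)),
      (PySem.List.pyRange 0 (xs.length : Int) 2).foldl
        (fun acc i =>
          let left := pyLjust (PySem.List.pyGetD xs i "").toList w
          let right := if i + 1 < (xs.length : Int) then
              pyLjust (PySem.List.pyGetD xs (i + 1) "").toList w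
            else []
          acc ++ [left ++ right]) acc = acc ++ altRows w xs
  | [], acc => by
    rw [show ((List.length ([] : List String)) : Int) = ((0 : Nat) : Int) from rfl, pyRange02]
    simp [altRows]
  | [x], acc => by
    rw [show ((List.length [x]) : Int) = ((1 : Nat) : Int) from rfl, pyRange02]
    norm_num
    simp [altRows]
  | x :: y :: rest, acc => by
    have hrec := loop_eq w rest
    rw [show ((List.length (x :: y :: rest)) : Int) = ((rest.length + 2 : Nat) : Int) by simp; ring,
        pyRange02, show (rest.length + 2 + 1) / 2 = (rest.length + 1) / 2 + 1 by omega,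
        List.range_succ_eq_map, List.map_cons, List.foldl_cons, List.map_map, List.foldl_map]
    refine (PySem.List.foldl_congr_mem (List.range ((rest.length + 1) / 2)) _
      (fun acc' k =>
          let left := pyLjust (PySem.List.pyGetD rest (2 * (k : Int)) "").toList w
          let right := if 2 * (k : Int) + 1 < (rest.length : Int) then
              pyLjust (PySem.List.pyGetD rest (2 * (k : Int) + 1) "").toList w
            else []
          acc' ++ [left ++ right]) _ ?_).trans ?_
    · intro a k hk
      simp only [Function.comp_apply]
      rw [show (2 * (((k : Nat).succ : Nat) : Int)) = ((2 * k : Nat) : Int) + 2 by push_cast; ring]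
      rw [show ((2 * k : Nat) : Int) + 2 + 1 = ((2 * k + 1 : Nat) : Int) + 2 by push_cast; ring]
      rw [pyGetD_shift2, pyGetD_shift2]
      have hcond : (((2 * k + 1 : Nat) : Int) + 2 < ((rest.length + 2 : Nat) : Int)) ↔
          (2 * (k : Int) + 1 < (rest.length : Int)) := by push_cast; omega
      simp only [hcond]
      rw [show ((2 * k : Nat) : Int) = 2 * (k : Int) by push_cast; ring,
          show ((2 * k + 1 : Nat) : Int) = 2 * (k : Int) + 1 by push_cast; ring]
    · have hinit :
          (let left := pyLjust (PySem.List.pyGetD (x :: y :: rest) (2 * ((0 : Nat) : Int)) "").toList w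
           let right := if 2 * ((0 : Nat) : Int) + 1 < ((rest.length + 2 : Nat) : Int) then
               pyLjust (PySem.List.pyGetD (x :: y :: rest) (2 * ((0 : Nat) : Int) + 1) "").toList w
             else []
           acc ++ [left ++ right]) = acc ++ [pyLjust x.toList w ++ pyLjust y.toList w] := by
        rw [if_pos (by push_cast; omega)]
        simp [PySem.List.pyGetD]
      rw [hinit]
      have := hrec (acc ++ [pyLjust x.toList w ++ pyLjust y.toList w])
      rw [pyRange02, List.foldl_map] at this
      rw [this]
      simp [altRows]

-- "\n".join(r :: rows) = r ++ concat of '\n'-prefixed later rows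
lemma join_newline_flat (rows : List (List Char)) (r : List Char) :
    PySem.Chars.join ['\n'] (r :: rows) = r ++ rows.flatMap (fun s => '\n' :: s) := by
  induction rows generalizing r with
  | nil => simp [PySem.Chars.join_singleton]
  | cons s rows ih => rw [PySem.Chars.join_cons_cons, ih s]; simp

-- "".join is plain concatenation
lemma join_empty : ∀ (l : List (List Char)), PySem.Chars.join [] l = l.flatMap id
  | [] => by simp [PySem.Chars.join_nil]
  | [a] => by simp [PySem.Chars.join_singleton]
  | a :: b :: r => by rw [PySem.Chars.join_cons_cons, join_empty (b :: r)]; simp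

lemma even_cond (k : Int) (hk : 0 < k) : (0 < 2 * k ∧ PySem.Int.mod (2 * k) 2 = 0) := by
  refine ⟨by omega, ?_⟩
  rw [PySem.Int.mod_eq_emod_of_pos (by norm_num : (0 : Int) < 2)]; omega

lemma odd_cond (k : Int) : ¬ (0 < 2 * k + 1 ∧ PySem.Int.mod (2 * k + 1) 2 = 0) := by
  rintro ⟨-, h⟩
  rw [PySem.Int.mod_eq_emod_of_pos (by norm_num : (0 : Int) < 2)] at h; omega

-- B's flattened pass, started at a positive even index, prefixes every row with '\n'
lemma flat_enum (w : Int) :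
    ∀ (xs : List String) (k : Int), 0 < k →
      (((PySem.List.enumerate xs (2 * k)).map (fun p =>
          (if 0 < p.1 ∧ PySem.Int.mod p.1 2 = 0 then ['\n'] else []) ++ pyLjust p.2.toList w)).flatMap id)
        = (altRows w xs).flatMap (fun s => '\n' :: s)
  | [], k, hk => by simp [PySem.List.enumerate_nil, altRows]
  | [x], k, hk => by
    simp [PySem.List.enumerate_cons, PySem.List.enumerate_nil,
      (even_cond k hk).1, altRows]
  | x :: y :: rest, k, hk => by
    have hrec := flat_enum w rest (k + 1) (by omega)
    simp only [PySem.List.enumerate_cons, List.map_cons, List.flatMap_cons, id]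
    rw [if_pos (even_cond k hk), if_neg (odd_cond k),
        show 2 * k + 1 + 1 = 2 * (k + 1) by ring, hrec]
    simp [altRows]

-- B's output is the '\n'-join of the row view
lemma alt_eq_rows (w : Int) (xs : List String) :
    PySem.Chars.join []
      ((PySem.List.enumerate xs 0).map (fun p =>
        (if 0 < p.1 ∧ PySem.Int.mod p.1 2 = 0 then ['\n'] else []) ++ pyLjust p.2.toList w))
      = PySem.Chars.join ['\n'] (altRows w xs) := by
  rw [join_empty]
  have h0 : ¬ (0 < (0 : Int) ∧ PySem.Int.mod 0 2 = 0) := by norm_num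
  have h1 : ¬ (0 < (1 : Int) ∧ PySem.Int.mod 1 2 = 0) := by
    have := odd_cond 0; simp only [mul_zero, zero_add] at this; exact this
  rcases xs with - | ⟨x, rest⟩
  · simp [PySem.List.enumerate_nil, PySem.Chars.join_nil, altRows]
  rcases rest with - | ⟨y, rest'⟩
  · simp [PySem.List.enumerate_cons, PySem.List.enumerate_nil, PySem.Chars.join_singleton,
      altRows]
  · have hflat := flat_enum w rest' 1 (by norm_num)
    simp only [PySem.List.enumerate_cons, List.map_cons, List.flatMap_cons, id, zero_add]
    rw [if_neg h0, if_neg h1, show (1 : Int) + 1 = 2 * 1 by ring, hflat,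
        show altRows w (x :: y :: rest') =
          (pyLjust x.toList w ++ pyLjust y.toList w) :: altRows w rest' from rfl,
        join_newline_flat]
    simp

-- ===== VERDICT (by name: the statement is the Claim_ definition above) =====
theorem format_menu_spec : Claim_equal_format_menu := by
  intro options _ _
  show format_menu options = format_menu_alt options
  simp only [format_menu, format_menu_alt]
  rw [loop_eq, alt_eq_rows]
  simp
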